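-- pv_equiv track=rewrite | github.com/ClayGendron/vfs | src/grover/patterns.py | _is_literal_ext_tail
-- ===== SOURCE A (Python) =====
-- _GLOB_METACHARS = frozenset("*?[{")
--
-- def _is_literal_ext_tail(segment: str) -> str | None:
--     """Return the literal ext iff *segment* has shape ``*.<literal-ext>``.
--
--     The ext must contain no glob metacharacters and no dots. Returns the
--     lowercased ext with length ≤ 32 (matching ``extract_extension``), or
--     ``None`` if the segment does not match.
--     """
--     if not segment.startswith("*."):
--         return None
--     ext = segment[2:]
--     if not ext or len(ext) > 32:
--         return None
--     for ch in ext: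
--         if ch in _GLOB_METACHARS or ch == ".":
--             return None
--     return ext.lower()
-- ===== SOURCE B (Python) =====
-- def _is_literal_ext_tail(segment: str) -> str | None:
--     """Streaming re-implementation: one pass over an iterator, building the
--     lowercased ext as it goes (no slicing, no separate length/emptiness passes)."""
--     it = iter(segment)
--     if next(it, None) != '*' or next(it, None) != '.':
--         return None
--     out = []
--     for ch in it:
--         if len(out) == 32 or ch in '*?[{.':
--             return None
--         out.append(ch.lower())
--     return ''.join(out) if out else None
-- ===== Notes on version B (the rewrite author's own statement) =====
-- stated objective: alternative
-- what changed: Replaces prefix-test + slice + separate length guard + validate-then-lower with a single streaming pass over an iterator that checks the two header chars, enforces the 32-char cap with the accumulator length, and builds the lowercased extension character by character.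
import Mathlib
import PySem

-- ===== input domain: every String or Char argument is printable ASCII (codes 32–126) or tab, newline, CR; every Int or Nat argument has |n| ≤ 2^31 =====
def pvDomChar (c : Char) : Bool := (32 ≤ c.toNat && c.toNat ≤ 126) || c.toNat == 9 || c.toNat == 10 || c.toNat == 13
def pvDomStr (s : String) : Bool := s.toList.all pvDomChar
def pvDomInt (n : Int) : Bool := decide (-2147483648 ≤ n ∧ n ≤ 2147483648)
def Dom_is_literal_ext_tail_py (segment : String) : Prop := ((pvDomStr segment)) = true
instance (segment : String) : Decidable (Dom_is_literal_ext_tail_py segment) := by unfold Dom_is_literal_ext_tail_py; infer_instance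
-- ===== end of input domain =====

-- B replaces A's prefix-test + slice + length guard + validate-then-lower with one
-- streaming pass that builds the lowercased extension as it goes (alternative, same cost).


-- ===== PORT A =====
-- _GLOB_METACHARS = frozenset("*?[{")
def pvGlobMetachars : PySem.Set Char := PySem.Set.ofList ['*', '?', '[', '{']

-- the `for ch in ext:` loop with its early `return None`
def pvForA (ext : String) : List Char → Option String
  | [] => some (PySem.Str.lower ext)
  | ch :: rest =>
      if pvGlobMetachars.contains ch || ch == '.' then none
      else pvForA ext rest

def is_literal_ext_tail_py (segment : String) : Option String :=
  if !(PySem.Str.startswith segment "*.") then none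
  else
    let ext := PySem.Str.slice segment (some 2) none
    if PySem.Str.len ext = 0 ∨ 32 < PySem.Str.len ext then none
    else pvForA ext ext.toList

-- ===== PORT B =====
-- the `for ch in it:` loop: cap check on the accumulator, bad-char check, lower-and-append
def pvForB : List Char → List Char → Option (List Char)
  | out, [] => if out = [] then none else some out
  | out, ch :: rest =>
      if out.length == 32 || ch ∈ (['*', '?', '[', '{', '.'] : List Char) then none
      else pvForB (out ++ [PySem.Chars.lowerChar ch]) rest

def is_literal_ext_tail_py_alt (segment : String) : Option String :=
  -- the two `next(it, None)` checks read the first two characters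
  match segment.toList with
  | c1 :: c2 :: rest =>
      if c1 ≠ '*' ∨ c2 ≠ '.' then none
      else (pvForB [] rest).map String.ofList
  | _ => none

-- ===== PRECONDITION & SPEC =====
def Spec_is_literal_ext_tail_py (segment : String) (out : Option String) : Prop := out = is_literal_ext_tail_py_alt segment
instance (segment : String) (out : Option String) : Decidable (Spec_is_literal_ext_tail_py segment out) := by unfold Spec_is_literal_ext_tail_py; infer_instance

-- ===== CLAIM (what is proved, stated in full; the proofs are below) =====
def Claim_equal_is_literal_ext_tail_py : Prop := ∀ (segment : String), Dom_is_literal_ext_tail_py segment → Spec_is_literal_ext_tail_py segment (is_literal_ext_tail_py segment)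

-- ===== LEMMAS AND PROOFS =====
def pvBad (c : Char) : Bool := c ∈ (['*', '?', '[', '{', '.'] : List Char)

theorem pvForA_spec (ext : String) (cs : List Char) :
    pvForA ext cs = if cs.all (fun c => !pvBad c) then some (PySem.Str.lower ext) else none := by
  induction cs with
  | nil => simp [pvForA]
  | cons c cs ih =>
      have hc : (pvGlobMetachars.contains c || c == '.') = pvBad c := by
        rw [PySem.Set.contains_eq_decide]
        simp [pvGlobMetachars, PySem.Set.mem_ofList, pvBad]
        by_cases h1 : c = '*' <;> by_cases h2 : c = '?' <;> by_cases h3 : c = '[' <;>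
          by_cases h4 : c = '{' <;> by_cases h5 : c = '.' <;> simp [h1, h2, h3, h4, h5]
      rw [pvForA, hc, ih]
      by_cases hb : pvBad c <;> simp [hb]

theorem pvForB_spec (cs : List Char) : ∀ (out : List Char), out.length ≤ 32 →
    pvForB out cs =
      if out ++ cs ≠ [] ∧ out.length + cs.length ≤ 32 ∧ cs.all (fun c => !pvBad c)
      then some (out ++ PySem.Chars.lower cs) else none := by
  induction cs with
  | nil =>
      intro out hout
      by_cases h : out = [] <;> simp [pvForB, h, PySem.Chars.lower, hout]
  | cons c cs ih =>
      intro out hout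
      rw [pvForB]
      by_cases hcap : out.length = 32
      · rw [if_pos (by simp [hcap]),
          if_neg (by rintro ⟨-, h, -⟩; simp at h; omega)]
      · by_cases hb : c ∈ (['*', '?', '[', '{', '.'] : List Char)
        · rw [if_pos (by simp [hb]),
            if_neg (by rintro ⟨-, -, h⟩; rw [List.all_cons] at h; simp [pvBad, hb] at h)]
        · have hlen : (out ++ [PySem.Chars.lowerChar c]).length ≤ 32 := by simp; omega
          rw [if_neg (by simp [hcap, hb]), ih _ hlen]
          have hbad : pvBad c = false := by simp [pvBad, hb]
          simp only [PySem.Chars.lower, List.map_cons, List.all_cons, hbad, Bool.not_false,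
            Bool.true_and, List.length_cons, List.length_append, List.length_singleton,
            ne_eq, List.append_assoc, List.singleton_append, List.append_eq_nil_iff,
            List.cons_ne_nil, and_false, not_false_eq_true, true_and, List.length_nil]
          split_ifs with h1 h2 h3 <;>
            first | rfl
                  | (exact (h2 ⟨by omega, h1.2⟩).elim)
                  | (exact (h1 ⟨by omega, h3.2⟩).elim)

theorem pvString_ofList_eq (s : String) (l : List Char) (h : l = s.toList) :
    String.ofList l = s := by
  apply String.toList_inj.mp; simp [h]

-- ===== VERDICT (by name: the statement is the Claim_ definition above) =====
set_option maxHeartbeats 2000000 in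
theorem is_literal_ext_tail_py_spec : Claim_equal_is_literal_ext_tail_py := by
  unfold Claim_equal_is_literal_ext_tail_py Spec_is_literal_ext_tail_py
  intro segment _
  unfold is_literal_ext_tail_py is_literal_ext_tail_py_alt
  have hsw : PySem.Str.startswith segment "*." = PySem.Chars.startswith segment.toList ['*', '.'] := by
    rw [PySem.Str.startswith_eq]; rfl
  match hseg : segment.toList with
  | [] =>
      have : PySem.Chars.startswith ([] : List Char) ['*', '.'] = false := by decide
      simp [hsw, hseg, this]
  | [c1] =>
      by_cases h1 : c1 = '*'
      · subst h1
        have : PySem.Chars.startswith ['*'] ['*', '.'] = false := by decide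
        simp [hsw, hseg, this]
      · have : PySem.Chars.startswith [c1] ['*', '.'] = false := by
          rw [Bool.eq_false_iff]
          intro hcon
          rcases (PySem.Chars.startswith_iff _ _).mp hcon with ⟨t, ht⟩
          simp at ht
        simp [hsw, hseg, this]
  | c1 :: c2 :: rest =>
      by_cases h12 : c1 = '*' ∧ c2 = '.'
      · obtain ⟨h1, h2⟩ := h12; subst h1; subst h2
        have hpre : PySem.Chars.startswith ('*' :: '.' :: rest) ['*', '.'] = true := by
          rw [PySem.Chars.startswith_iff]; exact ⟨rest, rfl⟩
        have hext : (PySem.Str.slice segment (some 2) none).toList = rest := by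
          rw [PySem.Str.toList_slice, PySem.Chars.slice_eq_listSlice,
            PySem.List.slice_from _ (by norm_num : (0:Int) ≤ 2), hseg]
          rfl
        have hlen : PySem.Str.len (PySem.Str.slice segment (some 2) none) = (rest.length : Int) := by
          rw [PySem.Str.len_eq, hext]
        rw [hsw, hseg, hpre]
        simp only [Bool.not_true, Bool.false_eq_true, if_false, hlen, hext]
        rw [pvForA_spec, pvForB_spec rest [] (by simp)]
        simp only [ne_eq, not_true, or_self_iff, List.nil_append, List.length_nil,
          Nat.zero_add, List.length_cons]
        rw [if_neg not_false]
        by_cases hnil : rest = []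
        · simp [hnil]
        · by_cases hgt : 32 < rest.length
          · rw [if_pos (Or.inr (by exact_mod_cast hgt)),
              if_neg (by rintro ⟨-, h, -⟩; omega)]
            simp
          · rw [if_neg (by
              rintro (h | h)
              · exact hnil (List.length_eq_zero_iff.mp (by exact_mod_cast h))
              · exact hgt (by exact_mod_cast h))]
            by_cases hall : rest.all (fun c => !pvBad c)
            · rw [if_pos hall, if_pos ⟨hnil, by omega, hall⟩]
              simp only [Option.map_some]
              congr 1
              refine (pvString_ofList_eq _ _ ?_).symm
              rw [PySem.Str.toList_lower, hext]
            · rw [if_neg hall, if_neg (by rintro ⟨-, -, h⟩; exact hall h)]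
              simp
      · have hnpre : PySem.Chars.startswith (c1 :: c2 :: rest) ['*', '.'] = false := by
          rw [Bool.eq_false_iff]
          intro hcon
          rcases (PySem.Chars.startswith_iff _ _).mp hcon with ⟨t, ht⟩
          simp at ht
          exact h12 ⟨ht.1.symm, ht.2.1.symm⟩
        rw [hsw, hseg, hnpre]
        have h12' : c1 ≠ '*' ∨ c2 ≠ '.' := by rw [not_and_or] at h12; exact h12
        simp [h12']
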